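-- pv_equiv track=rewrite | github.com/Pranav-g25/SeQUeNCe-MDP | SEQ_MDP_multi_mem/q_learning_multi_mem.py | split_action_into_layers
-- ===== SOURCE A (Python) =====
-- def split_action_into_layers(action):
--     node_pairs = {node: pairs for node, pairs in action}
--     max_layers = max(pairs for _, pairs in action) if action else 1
--     layers = []
--
--     for layer_idx in range(max_layers):
--         current_layer = []
--         for node, total_pairs in node_pairs.items():
--             if layer_idx < total_pairs:
--                 current_layer.append(node)
--         if current_layer:
--             layers.append(sorted(current_layer))
--     return layers
-- ===== SOURCE B (Python) =====
-- # B: group nodes by their pair-count once, then build layers back-to-front by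
-- # merging each new group into the previous (already sorted) layer: O(N log N + output)
-- # instead of A's rescan-and-sort per layer.
-- def _merge(xs, ys):
--     out = []
--     i = j = 0
--     while i < len(xs) and j < len(ys):
--         if xs[i] <= ys[j]:
--             out.append(xs[i]); i += 1
--         else:
--             out.append(ys[j]); j += 1
--     out.extend(xs[i:])
--     out.extend(ys[j:])
--     return out
--
-- def split_action_into_layers(action):
--     pairs_of = dict(action)
--     pos = [(p, n) for n, p in pairs_of.items() if p > 0]
--     groups = {}
--     for p, n in pos:
--         groups.setdefault(p, []).append(n)
--     if not groups:
--         return []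
--     layers_rev = []
--     current = []
--     for i in range(max(groups), 0, -1):
--         current = _merge(current, sorted(groups.get(i, [])))
--         layers_rev.append(current)
--     return layers_rev[::-1]
-- ===== Notes on version B (the rewrite author's own statement) =====
-- stated objective: faster
-- what changed: Instead of rescanning all nodes and re-sorting the layer for every layer index, B groups nodes by their pair count once and builds the layers back-to-front, merging each count-group into the previous already-sorted layer.
import Mathlib
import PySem

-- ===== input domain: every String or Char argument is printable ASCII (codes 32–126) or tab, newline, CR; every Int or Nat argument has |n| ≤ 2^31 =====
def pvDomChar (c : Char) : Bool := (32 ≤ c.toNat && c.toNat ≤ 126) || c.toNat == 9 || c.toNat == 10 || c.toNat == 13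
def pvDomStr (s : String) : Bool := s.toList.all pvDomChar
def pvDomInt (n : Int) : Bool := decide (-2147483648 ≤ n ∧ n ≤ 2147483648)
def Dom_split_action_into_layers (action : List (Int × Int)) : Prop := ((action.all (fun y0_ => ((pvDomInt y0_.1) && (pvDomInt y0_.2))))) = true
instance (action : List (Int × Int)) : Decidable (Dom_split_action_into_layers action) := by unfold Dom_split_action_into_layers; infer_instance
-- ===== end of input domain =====

-- B groups nodes by pair-count once and builds the layers back-to-front, merging each
-- group into the previous sorted layer, instead of A's per-layer rescan and sort.

-- ===== PORT A =====

def split_action_into_layers (action : List (Int × Int)) : List (List Int) :=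
  let node_pairs := PySem.Dict.ofList action
  let max_layers : Int :=
    if action.isEmpty then 1
    else (PySem.List.max? (action.map (fun p => p.2)) (fun x => x)).getD 0
  (PySem.List.pyRange 0 max_layers 1).foldl
    (fun layers layer_idx =>
      let current := node_pairs.items.foldl
        (fun cur p => if layer_idx < p.2 then cur ++ [p.1] else cur) ([] : List Int)
      if current = [] then layers
      else layers ++ [PySem.List.sorted current (fun x => x) false]) []

-- ===== PORT B =====
-- merge of two sorted lists (port of Source B's _merge; structural recursion replaces the index loop)
def pvMerge : List Int → List Int → List Int
  | [], ys => ys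
  | x :: xs, [] => x :: xs
  | x :: xs, y :: ys =>
      if x ≤ y then x :: pvMerge xs (y :: ys) else y :: pvMerge (x :: xs) ys

def split_action_into_layers_alt (action : List (Int × Int)) : List (List Int) :=
  let pairs_of := PySem.Dict.ofList action
  let pos := (pairs_of.items.filter (fun p => 0 < p.2)).map (fun p => (p.2, p.1))
  let groups := pos.foldl (fun g q => g.modify q.1 [] (fun l => l ++ [q.2]))
    (PySem.Dict.empty : PySem.Dict Int (List Int))
  if groups.size = 0 then []
  else
    let m := (PySem.List.max? groups.keys (fun x => x)).getD 0
    let res := (PySem.List.pyRange m 0 (-1)).foldl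
      (fun (st : List (List Int) × List Int) i =>
        let cur := pvMerge st.2 (PySem.List.sorted (groups.getD i []) (fun x => x) false)
        (st.1 ++ [cur], cur)) ([], [])
    res.1.reverse

-- ===== PRECONDITION & SPEC =====
def Spec_split_action_into_layers (action : List (Int × Int)) (out : List (List Int)) : Prop := out = split_action_into_layers_alt action
instance (action : List (Int × Int)) (out : List (List Int)) : Decidable (Spec_split_action_into_layers action out) := by unfold Spec_split_action_into_layers; infer_instance

-- ===== CLAIM (what is proved, stated in full; the proofs are below) =====
def Claim_equal_split_action_into_layers : Prop := ∀ (action : List (Int × Int)), Dom_split_action_into_layers action → Spec_split_action_into_layers action (split_action_into_layers action)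

-- ===== LEMMAS AND PROOFS =====
-- layer contents: the nodes whose pair count exceeds i, in dict order, and the sorted layer
def pvNodes (action : List (Int × Int)) (i : Int) : List Int :=
  ((PySem.Dict.ofList action).items.filter (fun p => i < p.2)).map (fun p => p.1)

def pvL (action : List (Int × Int)) (i : Int) : List Int :=
  PySem.List.sorted (pvNodes action i) (fun x => x) false

def pvM (action : List (Int × Int)) : Int :=
  if action.isEmpty then 1
  else (PySem.List.max? (action.map (fun p => p.2)) (fun x => x)).getD 0

def pvPos (action : List (Int × Int)) : List (Int × Int) :=
  ((PySem.Dict.ofList action).items.filter (fun p => 0 < p.2)).map (fun p => (p.2, p.1))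

def pvGroups (action : List (Int × Int)) : PySem.Dict Int (List Int) :=
  (pvPos action).foldl (fun g q => g.modify q.1 [] (fun l => l ++ [q.2]))
    (PySem.Dict.empty : PySem.Dict Int (List Int))

theorem pvAlt_char (action : List (Int × Int)) :
    split_action_into_layers_alt action =
      (if (pvGroups action).size = 0 then []
       else
        let m := (PySem.List.max? (pvGroups action).keys (fun x => x)).getD 0
        (((PySem.List.pyRange m 0 (-1)).foldl
          (fun (st : List (List Int) × List Int) i =>
            (st.1 ++ [pvMerge st.2 (PySem.List.sorted ((pvGroups action).getD i []) (fun x => x) false)],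
             pvMerge st.2 (PySem.List.sorted ((pvGroups action).getD i []) (fun x => x) false)))
          ([], [])).1).reverse) := rfl

theorem pvMerge_perm (a b : List Int) : (pvMerge a b).Perm (a ++ b) := by
  induction a, b using pvMerge.induct with
  | case1 ys => simp [pvMerge]
  | case2 x xs => simp [pvMerge]
  | case3 x xs y ys h ih => simpa [pvMerge, h] using ih.cons x
  | case4 x xs y ys h ih =>
      simp only [pvMerge, h]
      exact (ih.cons y).trans List.perm_middle.symm

theorem pvMerge_pairwise : ∀ {a b : List Int}, a.Pairwise (· ≤ ·) → b.Pairwise (· ≤ ·) →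
    (pvMerge a b).Pairwise (· ≤ ·) := by
  intro a b ha hb
  induction a, b using pvMerge.induct with
  | case1 ys => simpa [pvMerge] using hb
  | case2 x xs => simpa [pvMerge] using ha
  | case3 x xs y ys h ih =>
      simp only [pvMerge, h, if_pos]
      refine List.pairwise_cons.mpr ⟨?_, ih (List.pairwise_cons.mp ha).2 hb⟩
      intro z hz
      have hz' := (pvMerge_perm xs (y :: ys)).mem_iff.mp hz
      rcases List.mem_append.mp hz' with h1 | h1
      · exact (List.pairwise_cons.mp ha).1 z h1
      · rcases List.mem_cons.mp h1 with rfl | h2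
        · exact h
        · exact le_trans h ((List.pairwise_cons.mp hb).1 z h2)
  | case4 x xs y ys h ih =>
      simp only [pvMerge, h]
      have hyx : y ≤ x := le_of_not_ge h
      refine List.pairwise_cons.mpr ⟨?_, ih ha (List.pairwise_cons.mp hb).2⟩
      intro z hz
      have hz' := (pvMerge_perm (x :: xs) ys).mem_iff.mp hz
      rcases List.mem_append.mp hz' with h1 | h1
      · rcases List.mem_cons.mp h1 with rfl | h2
        · exact hyx
        · exact le_trans hyx ((List.pairwise_cons.mp ha).1 z h2)
      · exact (List.pairwise_cons.mp hb).1 z h1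

theorem pvFilter_or_perm {α : Type} (l : List α) (q r : α → Bool)
    (h : ∀ x ∈ l, ¬(q x = true ∧ r x = true)) :
    (l.filter (fun x => q x || r x)).Perm (l.filter q ++ l.filter r) := by
  induction l with
  | nil => simp
  | cons x t ih =>
      have ih' := ih (fun y hy => h y (List.mem_cons_of_mem x hy))
      by_cases hq : q x = true
      · have hr : r x = false := by
          rcases Bool.eq_false_or_eq_true (r x) with h1 | h1
          · exact absurd ⟨hq, h1⟩ (h x List.mem_cons_self)
          · exact h1
        simpa [List.filter_cons, hq, hr] using ih'.cons x
      · have hq' : q x = false := by simpa using hq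
        by_cases hr : r x = true
        · simp only [List.filter_cons, hq', hr, Bool.false_or]
          exact (ih'.cons x).trans List.perm_middle.symm
        · have hr' : r x = false := by simpa using hr
          simpa [List.filter_cons, hq', hr'] using ih'

theorem pvInner (action : List (Int × Int)) (i : Int) :
    (PySem.Dict.ofList action).items.foldl
      (fun cur p => if i < p.2 then cur ++ [p.1] else cur) ([] : List Int) = pvNodes action i := by
  have h := PySem.List.foldl_append_if (fun p : Int × Int => decide (i < p.2))
    (fun p : Int × Int => p.1) (PySem.Dict.ofList action).items []
  simpa [pvNodes] using h

theorem pvA_char (action : List (Int × Int)) :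
    split_action_into_layers action =
      ((PySem.List.pyRange 0 (pvM action) 1).filter
        (fun i => !decide (pvNodes action i = []))).map (pvL action) := by
  unfold split_action_into_layers
  have hfun : (fun (layers : List (List Int)) (layer_idx : Int) =>
        let current := (PySem.Dict.ofList action).items.foldl
          (fun cur p => if layer_idx < p.2 then cur ++ [p.1] else cur) ([] : List Int)
        if current = [] then layers
        else layers ++ [PySem.List.sorted current (fun x => x) false]) =
      (fun acc i => if (!decide (pvNodes action i = [])) = true then acc ++ [pvL action i] else acc) := by
    funext layers i
    simp only [pvInner action i]
    by_cases h : pvNodes action i = [] <;> simp [h, pvL]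
  simp only [hfun]
  show List.foldl _ [] (PySem.List.pyRange 0 (pvM action) 1) = _
  rw [PySem.List.foldl_append_if (fun i => !decide (pvNodes action i = [])) (pvL action)
    (PySem.List.pyRange 0 (pvM action) 1) []]
  simp

theorem pvMem_items_update (l : List (Int × Int)) :
    ∀ (d : PySem.Dict Int Int) (p : Int × Int), p ∈ (d.update l).items → p ∈ d.items ∨ p ∈ l := by
  induction l with
  | nil => intro d p h; exact Or.inl h
  | cons a t ih =>
      intro d p h
      have h' : p ∈ ((d.insert a.1 a.2).update t).items := h
      rcases ih (d.insert a.1 a.2) p h' with h1 | h1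
      · rcases (PySem.Dict.mem_items_insert d a.1 a.2 p).mp h1 with h2 | h2
        · right; rw [h2]; simp
        · exact Or.inl h2.1
      · exact Or.inr (List.mem_cons_of_mem a h1)

theorem pvMem_items_ofList {action : List (Int × Int)} {p : Int × Int}
    (h : p ∈ (PySem.Dict.ofList action).items) : p ∈ action := by
  rcases pvMem_items_update action PySem.Dict.empty p h with h1 | h1
  · simp [PySem.Dict.empty] at h1
  · exact h1

theorem pvGroups_keys (action : List (Int × Int)) :
    (pvGroups action).keys = PySem.Set.ofList ((pvPos action).map (fun q => q.1)) := by
  unfold pvGroups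
  rw [PySem.Dict.keys_foldl_modify_key (pvPos action) (fun q => q.1) []
    (fun _ q => (fun l => l ++ [q.2])) PySem.Dict.empty]
  rfl

theorem pvGroups_getD (action : List (Int × Int)) (c : Int) :
    (pvGroups action).getD c [] = ((pvPos action).filter (fun q => q.1 == c)).map (fun q => q.2) := by
  unfold pvGroups
  rw [PySem.Dict.getD_foldl_modify_append (pvPos action) PySem.Dict.empty c]
  simp

theorem pvGroups_getD' (action : List (Int × Int)) (i : Int) (hi : 1 ≤ i) :
    (pvGroups action).getD i [] =
      ((PySem.Dict.ofList action).items.filter (fun p => p.2 == i)).map (fun p => p.1) := by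
  rw [pvGroups_getD]
  unfold pvPos
  rw [List.filter_map, List.map_map]
  have hpred : ((PySem.Dict.ofList action).items.filter (fun p => 0 < p.2)).filter
      ((fun q : Int × Int => q.1 == i) ∘ (fun p : Int × Int => (p.2, p.1))) =
      (PySem.Dict.ofList action).items.filter (fun p => p.2 == i) := by
    rw [List.filter_filter]
    refine List.filter_congr ?_
    intro p _
    simp only [Function.comp]
    rcases Bool.eq_false_or_eq_true (p.2 == i) with h1 | h1
    · simp_all [beq_iff_eq]
      omega
    · simp_all [beq_iff_eq]
  rw [hpred]
  rfl

theorem pvStep (action : List (Int × Int)) (i : Int) (hi : 1 ≤ i) :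
    pvMerge (pvL action i) (PySem.List.sorted ((pvGroups action).getD i []) (fun x => x) false) =
      pvL action (i - 1) := by
  rw [pvGroups_getD' action i hi]
  set items := (PySem.Dict.ofList action).items with hitems
  set G := (items.filter (fun p => p.2 == i)).map (fun p => p.1) with hG
  have hperm : (pvMerge (pvL action i) (PySem.List.sorted G (fun x => x) false)).Perm
      (pvL action (i - 1)) := by
    have h1 := pvMerge_perm (pvL action i) (PySem.List.sorted G (fun x => x) false)
    have h2 : (pvL action i ++ PySem.List.sorted G (fun x => x) false).Perm
        (pvNodes action i ++ G) :=
      (PySem.List.sorted_perm _ _ _).append (PySem.List.sorted_perm _ _ _)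
    have hpred : items.filter (fun p => decide (i - 1 < p.2)) =
        items.filter (fun p => decide (i < p.2) || (p.2 == i)) := by
      refine List.filter_congr ?_
      intro p _
      rcases lt_trichotomy p.2 i with h | h | h
      · have h1 : ¬ i < p.2 := by omega
        have h2 : ¬ p.2 = i := by omega
        have h3 : ¬ i - 1 < p.2 := by omega
        simp [h1, h2, h3]
      · have h1 : i - 1 < p.2 := by omega
        simp [h]
      · have h1 : i - 1 < p.2 := by omega
        simp [h, h1]
    have h3 : (pvNodes action (i - 1)).Perm (pvNodes action i ++ G) := by
      unfold pvNodes
      rw [← hitems, hpred]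
      have h4 := pvFilter_or_perm items (fun p => decide (i < p.2)) (fun p => p.2 == i)
        (by intro p _ hc; simp only [decide_eq_true_eq, beq_iff_eq] at hc; omega)
      have h5 := h4.map (fun p : Int × Int => p.1)
      simpa using h5
    have h6 : (pvL action (i - 1)).Perm (pvNodes action (i - 1)) := PySem.List.sorted_perm _ _ _
    exact ((h1.trans h2).trans h3.symm).trans h6.symm
  refine PySem.List.eq_of_perm_of_pairwise_le_of_injective (fun x : Int => x)
    (fun a b h => h) hperm ?_ ?_
  · exact pvMerge_pairwise (PySem.List.sorted_pairwise _ _) (PySem.List.sorted_pairwise _ _)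
  · exact PySem.List.sorted_pairwise _ _

theorem pvFoldDown (action : List (Int × Int)) (j : Nat) : ∀ acc : List (List Int),
    (PySem.List.pyRange (j : Int) 0 (-1)).foldl
      (fun (st : List (List Int) × List Int) i =>
        (st.1 ++ [pvMerge st.2 (PySem.List.sorted ((pvGroups action).getD i []) (fun x => x) false)],
         pvMerge st.2 (PySem.List.sorted ((pvGroups action).getD i []) (fun x => x) false)))
      (acc, pvL action (j : Int))
    = (acc ++ (PySem.List.pyRange (j : Int) 0 (-1)).map (fun i => pvL action (i - 1)),
       pvL action 0) := by
  induction j with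
  | zero =>
      intro acc
      simp only [Nat.cast_zero]
      rw [PySem.List.pyRange_neg_one_eq_nil le_rfl]
      simp
  | succ n ih =>
      intro acc
      have hcons : PySem.List.pyRange ((n + 1 : Nat) : Int) 0 (-1) =
          ((n + 1 : Nat) : Int) :: PySem.List.pyRange ((n : Nat) : Int) 0 (-1) := by
        have he : ((n + 1 : Nat) : Int) - 1 = ((n : Nat) : Int) := by omega
        rw [PySem.List.pyRange_neg_one_cons (by push_cast; omega), he]
      rw [hcons]
      simp only [List.foldl_cons, List.map_cons]
      have hstep : pvMerge (pvL action ((n + 1 : Nat) : Int))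
          (PySem.List.sorted ((pvGroups action).getD ((n + 1 : Nat) : Int) []) (fun x => x) false) =
          pvL action ((n : Nat) : Int) := by
        have := pvStep action ((n + 1 : Nat) : Int) (by push_cast; omega)
        have he : ((n + 1 : Nat) : Int) - 1 = ((n : Nat) : Int) := by omega
        rw [he] at this
        exact this
      rw [hstep]
      rw [ih (acc ++ [pvL action ((n : Nat) : Int)])]
      have he : ((n + 1 : Nat) : Int) - 1 = ((n : Nat) : Int) := by omega
      rw [he, List.append_assoc]
      rfl

theorem pvShift (action : List (Int × Int)) (m : Int) :
    ((PySem.List.pyRange m 0 (-1)).map (fun i => pvL action (i - 1))).reverse =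
      (PySem.List.pyRange 0 m 1).map (pvL action) := by
  rw [PySem.List.pyRange_neg_one_eq_reverse]
  rw [List.map_reverse, List.reverse_reverse]
  simp only [zero_add]
  rw [PySem.List.pyRange_one 1 (m + 1), PySem.List.pyRange_one 0 m]
  simp only [List.map_map]
  have ht : (m + 1 - 1).toNat = (m - 0).toNat := by omega
  rw [ht]
  refine List.map_congr_left ?_
  intro k _
  simp only [Function.comp]
  congr 1
  omega

theorem pvNodes_nil (action : List (Int × Int)) (i : Int)
    (h : ∀ p ∈ (PySem.Dict.ofList action).items, ¬ i < p.2) : pvNodes action i = [] := by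
  unfold pvNodes
  rw [List.filter_eq_nil_iff.mpr (by intro p hp; simpa using h p hp)]
  rfl

theorem pvMain (action : List (Int × Int)) :
    split_action_into_layers action = split_action_into_layers_alt action := by
  rw [pvA_char, pvAlt_char]
  by_cases hpos : ((PySem.Dict.ofList action).items.filter (fun p => 0 < p.2)) = []
  · -- no node has a positive pair count: both sides are []
    have hg : pvGroups action = PySem.Dict.empty := by
      unfold pvGroups pvPos
      rw [hpos]
      rfl
    have hsz : (pvGroups action).size = 0 := by rw [hg]; rfl
    rw [if_pos hsz]
    have hnil : ∀ i ∈ PySem.List.pyRange 0 (pvM action) 1,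
        ¬ (fun i => !decide (pvNodes action i = [])) i = true := by
      intro i hi
      have h0 : (0:Int) ≤ i := (PySem.List.mem_pyRange_one.mp hi).1
      have hn : pvNodes action i = [] := by
        refine pvNodes_nil action i ?_
        intro p hp hlt
        have hmem : p ∈ (PySem.Dict.ofList action).items.filter (fun p => 0 < p.2) :=
          List.mem_filter.mpr ⟨hp, by simp; omega⟩
        rw [hpos] at hmem
        exact (List.not_mem_nil).elim hmem
      simp [hn]
    rw [List.filter_eq_nil_iff.mpr hnil]
    rfl
  · -- some node has a positive pair count
    obtain ⟨p0, hp0⟩ := List.exists_mem_of_ne_nil _ hpos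
    have hp0items : p0 ∈ (PySem.Dict.ofList action).items := (List.mem_filter.mp hp0).1
    have hp0pos : (0:Int) < p0.2 := by simpa using (List.mem_filter.mp hp0).2
    have hmemkeys : ∀ x : Int, x ∈ (pvGroups action).keys ↔
        ∃ p ∈ (PySem.Dict.ofList action).items, 0 < p.2 ∧ p.2 = x := by
      intro x
      rw [pvGroups_keys, PySem.Set.mem_ofList]
      simp only [pvPos, List.map_map, List.mem_map, List.mem_filter, Function.comp,
        decide_eq_true_eq]
      constructor
      · rintro ⟨p, ⟨hp, hpp⟩, rfl⟩; exact ⟨p, hp, hpp, rfl⟩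
      · rintro ⟨p, hp, hpp, rfl⟩; exact ⟨p, ⟨hp, hpp⟩, rfl⟩
    have hx0 : p0.2 ∈ (pvGroups action).keys := (hmemkeys _).mpr ⟨p0, hp0items, hp0pos, rfl⟩
    have hkne : (pvGroups action).keys ≠ [] := List.ne_nil_of_mem hx0
    obtain ⟨mv, hmv⟩ : ∃ mv, PySem.List.max? (pvGroups action).keys (fun x => x) = some mv := by
      cases hc : PySem.List.max? (pvGroups action).keys (fun x => x) with
      | none => exact absurd ((PySem.List.max?_eq_none_iff _ _).mp hc) hkne
      | some v => exact ⟨v, rfl⟩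
    have hmgetD : (PySem.List.max? (pvGroups action).keys (fun x => x)).getD 0 = mv := by
      rw [hmv]; rfl
    obtain ⟨pm, hpm_items, hpm_pos, hpm_eq⟩ := (hmemkeys mv).mp (PySem.List.max?_mem hmv)
    have hmv_pos : (0:Int) < mv := hpm_eq ▸ hpm_pos
    have hmv_ub : ∀ p ∈ (PySem.Dict.ofList action).items, 0 < p.2 → p.2 ≤ mv := by
      intro p hp hpp
      exact PySem.List.max?_isMax hmv _ ((hmemkeys _).mpr ⟨p, hp, hpp, rfl⟩)
    have hsz : ¬ (pvGroups action).size = 0 := by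
      intro h
      have : (pvGroups action).keys = [] := by
        have hl : (pvGroups action).keys.length = 0 := by
          simpa [PySem.Dict.keys, PySem.Dict.size] using h
        exact List.length_eq_zero_iff.mp hl
      exact hkne this
    rw [if_neg hsz]
    simp only [hmgetD]
    -- the starting second component is the (empty) top layer
    have hLm : pvL action mv = [] := by
      unfold pvL
      rw [PySem.List.sorted_eq_nil_iff]
      refine pvNodes_nil action mv ?_
      intro p hp hlt
      have := hmv_ub p hp (by omega)
      omega
    have hfold := pvFoldDown action mv.toNat []
    have hc : ((mv.toNat : Nat) : Int) = mv := Int.toNat_of_nonneg (le_of_lt hmv_pos)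
    rw [hc] at hfold
    rw [show (([], []) : List (List Int) × List Int) = (([] : List (List Int)), pvL action mv) by
      rw [hLm]]
    rw [hfold, List.nil_append, pvShift]
    -- the range A actually keeps is exactly [0, mv)
    have hane : action ≠ [] := by
      intro h
      rw [h] at hp0items
      exact (List.not_mem_nil).elim hp0items
    have hM : pvM action = (PySem.List.max? (action.map (fun p => p.2)) (fun x => x)).getD 0 := by
      unfold pvM
      rw [if_neg (by simpa [List.isEmpty_iff] using hane)]
    obtain ⟨rv, hrv⟩ : ∃ rv, PySem.List.max? (action.map (fun p => p.2)) (fun x => x) = some rv := by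
      cases hc2 : PySem.List.max? (action.map (fun p => p.2)) (fun x => x) with
      | none =>
          have := (PySem.List.max?_eq_none_iff _ _).mp hc2
          exact absurd this (by simpa using hane)
      | some v => exact ⟨v, rfl⟩
    have hmle : mv ≤ pvM action := by
      rw [hM, hrv]
      have hpm_act : pm ∈ action := pvMem_items_ofList hpm_items
      have hmem : pm.2 ∈ action.map (fun p => p.2) := List.mem_map_of_mem hpm_act
      have := PySem.List.max?_isMax hrv _ hmem
      simp only [Option.getD_some]
      omega
    have hfilter : (PySem.List.pyRange 0 (pvM action) 1).filter
        (fun i => !decide (pvNodes action i = [])) = PySem.List.pyRange 0 mv 1 := by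
      rw [PySem.List.pyRange_one_append 0 mv (pvM action) (by omega) hmle, List.filter_append]
      have h1 : (PySem.List.pyRange 0 mv 1).filter (fun i => !decide (pvNodes action i = [])) =
          PySem.List.pyRange 0 mv 1 := by
        refine List.filter_eq_self.mpr ?_
        intro i hi
        have hi' := PySem.List.mem_pyRange_one.mp hi
        have hne : pvNodes action i ≠ [] := by
          unfold pvNodes
          intro hnil2
          have hfe := List.map_eq_nil_iff.mp hnil2
          have hpmf : pm ∈ (PySem.Dict.ofList action).items.filter (fun p => decide (i < p.2)) :=
            List.mem_filter.mpr ⟨hpm_items, by simp; omega⟩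
          rw [hfe] at hpmf
          exact (List.not_mem_nil).elim hpmf
        simp [hne]
      have h2 : (PySem.List.pyRange mv (pvM action) 1).filter
          (fun i => !decide (pvNodes action i = [])) = [] := by
        refine List.filter_eq_nil_iff.mpr ?_
        intro i hi
        have hi' := PySem.List.mem_pyRange_one.mp hi
        have hn : pvNodes action i = [] := by
          refine pvNodes_nil action i ?_
          intro p hp hlt
          have := hmv_ub p hp (by omega)
          omega
        simp [hn]
      rw [h1, h2, List.append_nil]
    rw [hfilter]

-- ===== VERDICT (by name: the statement is the Claim_ definition above) =====
theorem split_action_into_layers_spec : Claim_equal_split_action_into_layers := by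
  intro action _
  unfold Spec_split_action_into_layers
  exact pvMain action
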